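-- pv_equiv track=rewrite | github.com/chrisvoo/jobby | scripts/pdf_replace.py | _pick_base14
-- ===== SOURCE A (Python) =====
-- SERIF_KEYWORDS = {"times", "garamond", "georgia", "cambria", "palatino", "book"}
--
-- MONO_KEYWORDS  = {"courier", "consolas", "mono", "menlo", "inconsolata", "source code"}
--
-- def _pick_base14(font_name: str, flags: int) -> str:
--     """Choose the closest Base-14 font by style keywords and flags."""
--     low = font_name.lower()
--     bold   = bool(flags & (1 << 18))
--     italic = bool(flags & (1 << 6))
--     if any(k in low for k in MONO_KEYWORDS):
--         return ("Courier-BoldOblique" if bold and italic else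
--                 "Courier-Bold" if bold else "Courier-Oblique" if italic else "Courier")
--     if any(k in low for k in SERIF_KEYWORDS):
--         return ("Times-BoldItalic" if bold and italic else
--                 "Times-Bold" if bold else "Times-Italic" if italic else "Times-Roman")
--     return ("Helvetica-BoldOblique" if bold and italic else
--             "Helvetica-Bold" if bold else "Helvetica-Oblique" if italic else "Helvetica")
-- ===== SOURCE B (Python) =====
-- # One flattened keyword->family map scanned once (mono entries first preserves
-- # A's mono-over-serif priority), then the font name is BUILT by concatenation:
-- # family + "-" + style suffix, with the two family-specific spellings
-- # ("Italic" for Times, "Oblique" otherwise; plain Times is "Times-Roman").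
--
-- _FAMILY_OF_KEYWORD = {
--     "courier": "Courier", "consolas": "Courier", "mono": "Courier",
--     "menlo": "Courier", "inconsolata": "Courier", "source code": "Courier",
--     "times": "Times", "garamond": "Times", "georgia": "Times",
--     "cambria": "Times", "palatino": "Times", "book": "Times",
-- }
--
-- def _pick_base14(font_name: str, flags: int) -> str:
--     """Choose the closest Base-14 font by style keywords and flags."""
--     low = font_name.lower()
--     family = next((fam for kw, fam in _FAMILY_OF_KEYWORD.items() if kw in low),
--                   "Helvetica")
--     suffix = "Bold" if flags & (1 << 18) else ""
--     if flags & (1 << 6):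
--         suffix += "Italic" if family == "Times" else "Oblique"
--     if not suffix:
--         return "Times-Roman" if family == "Times" else family
--     return family + "-" + suffix
-- ===== Notes on version B (the rewrite author's own statement) =====
-- stated objective: alternative
-- what changed: Replaces the two staged per-family any-keyword checks and three copies of nested bold/italic ternaries by one scan of a flattened keyword-to-family map (mono entries first keep the priority) and constructive assembly of the result string: family + '-' + suffix built from the flag bits.
import Mathlib
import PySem

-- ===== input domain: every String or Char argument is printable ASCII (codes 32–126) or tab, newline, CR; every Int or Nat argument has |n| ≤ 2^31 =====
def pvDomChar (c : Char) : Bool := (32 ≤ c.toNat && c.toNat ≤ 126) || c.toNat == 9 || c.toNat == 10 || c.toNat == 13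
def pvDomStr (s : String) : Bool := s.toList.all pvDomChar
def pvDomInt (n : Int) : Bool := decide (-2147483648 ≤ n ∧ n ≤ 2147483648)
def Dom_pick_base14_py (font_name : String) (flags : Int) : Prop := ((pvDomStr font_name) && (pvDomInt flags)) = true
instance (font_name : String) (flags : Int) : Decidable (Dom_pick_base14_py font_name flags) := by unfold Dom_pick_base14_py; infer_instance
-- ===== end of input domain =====

-- B scans one flattened keyword->family map (mono entries first keep A's priority) and
-- BUILDS the result string by concatenating family + "-" + suffix from the flag bits
-- instead of A's staged checks with nested per-family ternaries (objective: alternative).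


-- ===== PORT A =====
def MONO_KEYWORDS : List String :=
  ["courier", "consolas", "mono", "menlo", "inconsolata", "source code"]

def SERIF_KEYWORDS : List String :=
  ["times", "garamond", "georgia", "cambria", "palatino", "book"]

def pick_base14_py (font_name : String) (flags : Int) : String :=
  let low := PySem.Str.lower font_name
  let bold : Bool := PySem.Int.band flags (1 <<< (18 : Nat)) != 0
  let italic : Bool := PySem.Int.band flags (1 <<< (6 : Nat)) != 0
  if MONO_KEYWORDS.any (fun k => PySem.Str.isIn k low) then
    (if bold && italic then "Courier-BoldOblique" else
     if bold then "Courier-Bold" else if italic then "Courier-Oblique" else "Courier")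
  else if SERIF_KEYWORDS.any (fun k => PySem.Str.isIn k low) then
    (if bold && italic then "Times-BoldItalic" else
     if bold then "Times-Bold" else if italic then "Times-Italic" else "Times-Roman")
  else
    (if bold && italic then "Helvetica-BoldOblique" else
     if bold then "Helvetica-Bold" else if italic then "Helvetica-Oblique" else "Helvetica")

-- ===== PORT B =====
def pvFamilyOfKeyword : List (String × String) :=
  [("courier", "Courier"), ("consolas", "Courier"), ("mono", "Courier"),
   ("menlo", "Courier"), ("inconsolata", "Courier"), ("source code", "Courier"),
   ("times", "Times"), ("garamond", "Times"), ("georgia", "Times"),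
   ("cambria", "Times"), ("palatino", "Times"), ("book", "Times")]

def pick_base14_py_alt (font_name : String) (flags : Int) : String :=
  let low := PySem.Str.lower font_name
  let family :=
    ((pvFamilyOfKeyword.find? (fun p => PySem.Str.isIn p.1 low)).map Prod.snd).getD "Helvetica"
  let suffix : String := if PySem.Int.band flags (1 <<< (18 : Nat)) != 0 then "Bold" else ""
  -- 'suffix += …' and 'family + "-" + suffix': Python str concatenation, exact as list append
  let suffix : String :=
    if PySem.Int.band flags (1 <<< (6 : Nat)) != 0 then
      String.ofList (suffix.toList ++ (if family == "Times" then "Italic" else "Oblique").toList)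
    else suffix
  if suffix == "" then (if family == "Times" then "Times-Roman" else family)
  else String.ofList (family.toList ++ "-".toList ++ suffix.toList)

-- ===== PRECONDITION & SPEC =====
def Spec_pick_base14_py (font_name : String) (flags : Int) (out : String) : Prop := out = pick_base14_py_alt font_name flags
instance (font_name : String) (flags : Int) (out : String) : Decidable (Spec_pick_base14_py font_name flags out) := by unfold Spec_pick_base14_py; infer_instance

-- ===== CLAIM (what is proved, stated in full; the proofs are below) =====
def Claim_equal_pick_base14_py : Prop := ∀ (font_name : String) (flags : Int), Dom_pick_base14_py font_name flags → Spec_pick_base14_py font_name flags (pick_base14_py font_name flags)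

-- ===== LEMMAS AND PROOFS =====

-- find? over a block of keyword pairs that all carry the same family c
theorem pv_find_map_const (f : String → Bool) (ks : List String) (c : String)
    (rest : List (String × String)) :
    (((ks.map (fun k => (k, c)) ++ rest).find? (fun p => f p.1)).map Prod.snd)
      = if ks.any f then some c
        else ((rest.find? (fun p => f p.1)).map Prod.snd) := by
  induction ks with
  | nil => simp
  | cons k ks ih =>
    simp only [List.map_cons, List.cons_append, List.find?_cons, List.any_cons]
    by_cases h : f k <;>
      simp only [h, Option.map_some, Bool.true_or, Bool.false_or, if_true, ih]

theorem pv_family_eq (low : String) :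
    ((pvFamilyOfKeyword.find? (fun p => PySem.Str.isIn p.1 low)).map Prod.snd).getD "Helvetica"
      = if MONO_KEYWORDS.any (fun k => PySem.Str.isIn k low) then "Courier"
        else if SERIF_KEYWORDS.any (fun k => PySem.Str.isIn k low) then "Times"
        else "Helvetica" := by
  have hsplit : pvFamilyOfKeyword
      = MONO_KEYWORDS.map (fun k => (k, "Courier"))
        ++ (SERIF_KEYWORDS.map (fun k => (k, "Times")) ++ []) := by rfl
  rw [hsplit,
    pv_find_map_const (fun s => PySem.Str.isIn s low) MONO_KEYWORDS "Courier",
    pv_find_map_const (fun s => PySem.Str.isIn s low) SERIF_KEYWORDS "Times"]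
  split_ifs <;> rfl

-- ===== VERDICT (by name: the statement is the Claim_ definition above) =====
theorem pick_base14_py_spec : Claim_equal_pick_base14_py := by
  intro font_name flags _
  unfold Spec_pick_base14_py pick_base14_py pick_base14_py_alt
  simp only [pv_family_eq]
  cases hm : MONO_KEYWORDS.any (fun k => PySem.Str.isIn k (PySem.Str.lower font_name)) <;>
  cases hs : SERIF_KEYWORDS.any (fun k => PySem.Str.isIn k (PySem.Str.lower font_name)) <;>
  cases hb : PySem.Int.band flags (1 <<< (18 : Nat)) != 0 <;>
  cases hi : PySem.Int.band flags (1 <<< (6 : Nat)) != 0 <;> decide
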